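-- pv_equiv track=rewrite | github.com/Johnson-Gage-Inspection-Inc/CMCs | ExtractCMCsFromPDF.py | segment_by_blank_lines
-- ===== SOURCE A (Python) =====
-- def segment_by_blank_lines(lines):
--     """
--     Split a list of lines into segments using blank lines as boundaries.
--     Used in the dynamic expansion logic for Range/CMC.
--     """
--     segments = []
--     current_seg = []
--     for line in lines:
--         if not line.strip():
--             if current_seg:
--                 segments.append(current_seg)
--                 current_seg = []
--         else:
--             current_seg.append(line)
--     if current_seg:
--         segments.append(current_seg)
--     return segments
-- ===== SOURCE B (Python) =====
-- def segment_by_blank_lines(lines):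
--     """Segment by locating the next blank-line separator and slicing up to it,
--     instead of accumulating a current segment line by line."""
--     segments = []
--     rest = lines
--     while rest:
--         i = next((k for k, line in enumerate(rest) if not line.strip()), len(rest))
--         if i:
--             segments.append(rest[:i])
--         rest = rest[i + 1:]
--     return segments
-- ===== Notes on version B (the rewrite author's own statement) =====
-- stated objective: alternative
-- what changed: B repeatedly finds the index of the next blank separator and slices the segment out in one piece, instead of growing a current segment element by element through a single for-loop with two accumulators.
import Mathlib
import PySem

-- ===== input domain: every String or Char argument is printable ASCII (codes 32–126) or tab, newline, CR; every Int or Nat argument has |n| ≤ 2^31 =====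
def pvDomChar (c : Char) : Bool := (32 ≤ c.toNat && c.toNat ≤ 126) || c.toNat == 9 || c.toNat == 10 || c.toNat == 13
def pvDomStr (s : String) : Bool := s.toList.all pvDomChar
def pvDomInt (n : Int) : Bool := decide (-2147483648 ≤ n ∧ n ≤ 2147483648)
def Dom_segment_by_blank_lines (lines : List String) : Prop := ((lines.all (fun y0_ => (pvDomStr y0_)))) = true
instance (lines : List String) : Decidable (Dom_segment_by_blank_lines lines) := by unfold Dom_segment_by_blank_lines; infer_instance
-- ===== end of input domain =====

-- B finds the index of the next blank separator and slices each segment out whole,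
-- instead of A's line-by-line accumulation; alternative decomposition, same O(n) cost.


-- 'not line.strip()' : line strips to the empty string
def pvBlank (s : String) : Bool := PySem.Str.strip s == ""

-- ===== PORT A =====
-- the for-loop over lines with state (segments, current_seg), then the final flush
def segment_by_blank_lines (lines : List String) : List (List String) :=
  let p := lines.foldl
    (fun (st : List (List String) × List String) line =>
      if pvBlank line then
        if st.2 ≠ [] then (st.1 ++ [st.2], []) else st
      else (st.1, st.2 ++ [line]))
    ([], [])
  if p.2 ≠ [] then p.1 ++ [p.2] else p.1

-- ===== PORT B =====
-- the while-loop: find the first blank index i (len(rest) if none), slice, drop past it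
def segAltLoop (segments : List (List String)) (rest : List String) : List (List String) :=
  if h : rest = [] then segments
  else
    let i := rest.findIdx pvBlank
    let segments' := if i ≠ 0 then segments ++ [PySem.List.slice rest none (some (i : Int))] else segments
    segAltLoop segments' (PySem.List.slice rest (some ((i : Int) + 1)) none)
termination_by rest.length
decreasing_by
  have hi : ((i : Int) + 1) = ((i + 1 : Nat) : Int) := by push_cast; ring
  rw [hi, PySem.List.slice_from_natCast]
  simp only [List.length_drop]
  have := List.length_pos_of_ne_nil h
  omega

def segment_by_blank_lines_alt (lines : List String) : List (List String) :=
  segAltLoop [] lines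

-- ===== PRECONDITION & SPEC =====
def Spec_segment_by_blank_lines (lines : List String) (out : List (List String)) : Prop := out = segment_by_blank_lines_alt lines
instance (lines : List String) (out : List (List String)) : Decidable (Spec_segment_by_blank_lines lines out) := by unfold Spec_segment_by_blank_lines; infer_instance

-- ===== CLAIM (what is proved, stated in full; the proofs are below) =====
def Claim_equal_segment_by_blank_lines : Prop := ∀ (lines : List String), Dom_segment_by_blank_lines lines → Spec_segment_by_blank_lines lines (segment_by_blank_lines lines)

-- ===== LEMMAS AND PROOFS =====

theorem findIdx_append_of_all_false {α : Type} (p : α → Bool) (cur ys : List α)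
    (hc : ∀ l ∈ cur, p l = false) :
    List.findIdx p (cur ++ ys) = cur.length + List.findIdx p ys := by
  induction cur with
  | nil => simp
  | cons a t ih =>
    have ha : p a = false := hc a (by simp)
    simp [List.findIdx_cons, ha, ih (fun l hl => hc l (by simp [hl]))]
    omega

theorem segAltLoop_nil (segments : List (List String)) :
    segAltLoop segments [] = segments := by
  rw [segAltLoop]; simp

theorem segAltLoop_step (segments : List (List String)) (rest : List String) (h : rest ≠ []) :
    segAltLoop segments rest =
      segAltLoop
        (if rest.findIdx pvBlank ≠ 0 then
            segments ++ [PySem.List.slice rest none (some ((rest.findIdx pvBlank : Nat) : Int))]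
         else segments)
        (PySem.List.slice rest (some (((rest.findIdx pvBlank : Nat) : Int) + 1)) none) := by
  rw [segAltLoop]; simp [h]

-- the core invariant: A's loop from state (segments, current) on rest equals
-- B's loop from segments on current ++ rest, provided current holds no blank line
theorem loop_eq (rest : List String) :
    ∀ (segments : List (List String)) (current : List String),
      (∀ l ∈ current, pvBlank l = false) →
      (let p := rest.foldl
          (fun (st : List (List String) × List String) line =>
            if pvBlank line then
              if st.2 ≠ [] then (st.1 ++ [st.2], []) else st
            else (st.1, st.2 ++ [line]))
          (segments, current)
       if p.2 ≠ [] then p.1 ++ [p.2] else p.1)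
      = segAltLoop segments (current ++ rest) := by
  induction rest with
  | nil =>
    intro segments current hc
    simp only [List.foldl_nil, List.append_nil]
    by_cases hcur : current = []
    · subst hcur; simp [segAltLoop_nil]
    · rw [segAltLoop_step segments current hcur]
      have hfi : current.findIdx pvBlank = current.length := by
        have := findIdx_append_of_all_false pvBlank current [] hc
        simpa using this
      have hlen : current.length ≠ 0 := by
        cases current with
        | nil => exact absurd rfl hcur
        | cons a t => simp
      have hi : ((current.length : Nat) : Int) + 1 = ((current.length + 1 : Nat) : Int) := by
        push_cast; ring
      rw [hfi]
      simp only [hlen, if_pos, ne_eq, not_false_iff, hi,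
        PySem.List.slice_from_natCast, PySem.List.slice_to_natCast]
      have hdrop : current.drop (current.length + 1) = [] := by
        apply List.drop_eq_nil_of_le; omega
      simp [hcur, hdrop, segAltLoop_nil]
  | cons line rs ih =>
    intro segments current hc
    simp only [List.foldl_cons]
    by_cases hb : pvBlank line
    · -- blank: flush current (if nonempty), continue with empty current
      have hfi : (current ++ line :: rs).findIdx pvBlank = current.length := by
        rw [findIdx_append_of_all_false pvBlank current (line :: rs) hc]
        simp [List.findIdx_cons, hb]
      rw [segAltLoop_step segments (current ++ line :: rs) (by simp)]
      rw [hfi]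
      have hi : ((current.length : Nat) : Int) + 1 = ((current.length + 1 : Nat) : Int) := by
        push_cast; ring
      rw [hi, PySem.List.slice_from_natCast, PySem.List.slice_to_natCast]
      have htake : (current ++ line :: rs).take current.length = current := by
        exact List.take_left
      have hdrop : (current ++ line :: rs).drop (current.length + 1) = rs := by
        rw [← List.drop_drop, List.drop_left]; simp
      rw [htake, hdrop]
      by_cases hcur : current = []
      · subst hcur
        simp only [hb, if_pos, ne_eq, not_true_eq_false]
        simpa using ih segments [] (by simp)
      · have hlen : current.length ≠ 0 := by
          cases current with
          | nil => exact absurd rfl hcur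
          | cons a t => simp
        simp only [hb, if_pos, hcur, ne_eq, not_false_iff, hlen]
        simpa using ih (segments ++ [current]) [] (by simp)
    · -- non-blank: extend current
      have hb' : pvBlank line = false := by simpa using hb
      have hc' : ∀ l ∈ current ++ [line], pvBlank l = false := by
        intro l hl
        rcases List.mem_append.mp hl with h1 | h1
        · exact hc l h1
        · simp at h1; subst h1; exact hb'
      have := ih segments (current ++ [line]) hc'
      simpa [hb'] using this

-- ===== VERDICT (by name: the statement is the Claim_ definition above) =====
theorem segment_by_blank_lines_spec : Claim_equal_segment_by_blank_lines := by
  intro lines _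
  unfold Spec_segment_by_blank_lines segment_by_blank_lines segment_by_blank_lines_alt
  simpa using loop_eq lines [] [] (by simp)
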